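-- pv_equiv track=rewrite | github.com/rhozero-div/rhozero | scripts/fetch_data.py | compute_net_liquidity
-- ===== SOURCE A (Python) =====
-- def compute_net_liquidity(walcl: list, tga: list, rrp: list) -> list:
--     dates_vals = {}
--     for d, v in walcl:
--         dates_vals.setdefault(d, {})["WALCL"] = v
--     for d, v in tga:
--         dates_vals.setdefault(d, {})["TGA"] = v
--     for d, v in rrp:
--         dates_vals.setdefault(d, {})["RRP"] = v
--     result = []
--     for date in sorted(dates_vals.keys()):
--         vals = dates_vals[date]
--         if all(k in vals for k in ("WALCL", "TGA", "RRP")):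
--             net = vals["WALCL"] - vals["TGA"] - vals["RRP"]
--             result.append((date, net))
--     return result
-- ===== SOURCE B (Python) =====
-- def compute_net_liquidity(walcl: list, tga: list, rrp: list) -> list:
--     # Sort-merge join: sort each deduplicated series by date, then sweep the
--     # three sorted lists with three pointers, emitting a row whenever all
--     # three heads carry the same date.
--     a = sorted(dict(walcl).items(), key=lambda p: p[0])
--     b = sorted(dict(tga).items(), key=lambda p: p[0])
--     c = sorted(dict(rrp).items(), key=lambda p: p[0])
--     res = []
--     i = j = k = 0
--     while i < len(a) and j < len(b) and k < len(c):
--         da, db, dc = a[i][0], b[j][0], c[k][0]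
--         if da < db or da < dc:
--             i += 1
--         elif db < da or db < dc:
--             j += 1
--         elif dc < da or dc < db:
--             k += 1
--         else:
--             res.append((da, a[i][1] - b[j][1] - c[k][1]))
--             i += 1
--             j += 1
--             k += 1
--     return res
-- ===== Notes on version B (the rewrite author's own statement) =====
-- stated objective: alternative
-- what changed: Replaces A's nested per-date dict with an all(...)-filtered scan of the sorted date union by a sort-merge join: each series is deduplicated (last wins) and sorted by date, then a three-pointer sweep over the three sorted lists emits a row whenever all three heads share a date.
import Mathlib
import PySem

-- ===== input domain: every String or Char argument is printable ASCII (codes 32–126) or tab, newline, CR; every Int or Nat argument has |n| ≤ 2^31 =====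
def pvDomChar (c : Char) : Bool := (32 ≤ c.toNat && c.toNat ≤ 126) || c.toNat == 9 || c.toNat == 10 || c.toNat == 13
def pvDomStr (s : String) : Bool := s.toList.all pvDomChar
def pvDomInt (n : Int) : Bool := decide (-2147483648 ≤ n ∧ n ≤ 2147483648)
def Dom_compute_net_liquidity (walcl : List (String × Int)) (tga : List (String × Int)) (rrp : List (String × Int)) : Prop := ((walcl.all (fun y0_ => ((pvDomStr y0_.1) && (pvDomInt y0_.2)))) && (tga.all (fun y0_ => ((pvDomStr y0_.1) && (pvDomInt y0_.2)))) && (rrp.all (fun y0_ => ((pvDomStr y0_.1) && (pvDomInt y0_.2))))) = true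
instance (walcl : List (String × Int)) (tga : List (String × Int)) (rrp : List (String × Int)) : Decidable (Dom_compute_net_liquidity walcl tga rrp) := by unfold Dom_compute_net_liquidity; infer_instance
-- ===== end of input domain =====

-- B replaces A's nested per-date dict (setdefault) and all(...)-filtered scan of the sorted union of
-- dates by a sort-merge join: three deduplicated series sorted by date, swept by three pointers
-- (objective: alternative algorithm, same asymptotic cost).

-- ===== PORT A =====
-- dates_vals.setdefault(d, {})["K"] = v  is exactly  Dict.modify d {} (fun inner => inner.insert "K" v)
def compute_net_liquidity (walcl : List (String × Int)) (tga : List (String × Int)) (rrp : List (String × Int)) : List (String × Int) :=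
  let dv1 := walcl.foldl (fun D p => D.modify p.1 PySem.Dict.empty (fun inner => inner.insert "WALCL" p.2)) (PySem.Dict.empty : PySem.Dict String (PySem.Dict String Int))
  let dv2 := tga.foldl (fun D p => D.modify p.1 PySem.Dict.empty (fun inner => inner.insert "TGA" p.2)) dv1
  let dv3 := rrp.foldl (fun D p => D.modify p.1 PySem.Dict.empty (fun inner => inner.insert "RRP" p.2)) dv2
  (PySem.List.sorted dv3.keys (fun x => x) false).foldl
    (fun result date =>
      if (["WALCL", "TGA", "RRP"] : List String).all (fun k => (dv3.getD date PySem.Dict.empty).contains k) then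
        -- the guard ensures all three keys are present, so vals["K"] (never a KeyError here) is getD _ 0;
        -- dates_vals[date] with date ∈ keys is getD _ empty
        result ++ [(date, (dv3.getD date PySem.Dict.empty).getD "WALCL" 0 - (dv3.getD date PySem.Dict.empty).getD "TGA" 0 - (dv3.getD date PySem.Dict.empty).getD "RRP" 0)]
      else result) []

-- ===== PORT B =====
-- the while loop over the three cursors i, j, k: each iteration advances at least one cursor, so the
-- loop is the obvious recursion on the three remaining suffixes (total suffix length decreases)
def merge3NL : List (String × Int) → List (String × Int) → List (String × Int) → List (String × Int)
  | (da, va) :: a', (db, vb) :: b', (dc, vc) :: c' =>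
    if da < db ∨ da < dc then merge3NL a' ((db, vb) :: b') ((dc, vc) :: c')
    else if db < da ∨ db < dc then merge3NL ((da, va) :: a') b' ((dc, vc) :: c')
    else if dc < da ∨ dc < db then merge3NL ((da, va) :: a') ((db, vb) :: b') c'
    else (da, va - vb - vc) :: merge3NL a' b' c'
  | _, _, _ => []
termination_by a b c => a.length + b.length + c.length
decreasing_by all_goals (simp only [List.length_cons]; omega)

-- sorted(dict(xs).items(), key=lambda p: p[0])
def dedupSortNL (xs : List (String × Int)) : List (String × Int) :=
  PySem.List.sorted (PySem.Dict.ofList xs).items (fun p => p.1) false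

def compute_net_liquidity_alt (walcl : List (String × Int)) (tga : List (String × Int)) (rrp : List (String × Int)) : List (String × Int) :=
  merge3NL (dedupSortNL walcl) (dedupSortNL tga) (dedupSortNL rrp)

-- ===== PRECONDITION & SPEC =====
def Spec_compute_net_liquidity (walcl : List (String × Int)) (tga : List (String × Int)) (rrp : List (String × Int)) (out : List (String × Int)) : Prop := out = compute_net_liquidity_alt walcl tga rrp
instance (walcl : List (String × Int)) (tga : List (String × Int)) (rrp : List (String × Int)) (out : List (String × Int)) : Decidable (Spec_compute_net_liquidity walcl tga rrp out) := by unfold Spec_compute_net_liquidity; infer_instance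

-- ===== CLAIM (what is proved, stated in full; the proofs are below) =====
def Claim_equal_compute_net_liquidity : Prop := ∀ (walcl : List (String × Int)) (tga : List (String × Int)) (rrp : List (String × Int)), Dom_compute_net_liquidity walcl tga rrp → Spec_compute_net_liquidity walcl tga rrp (compute_net_liquidity walcl tga rrp)

-- ===== LEMMAS AND PROOFS =====

-- the canonical middle form both proofs target: sorted common dates, mapped to net values
def canonNL (walcl tga rrp : List (String × Int)) : List (String × Int) :=
  (PySem.List.sorted (PySem.Set.inter (PySem.Set.inter (PySem.Set.ofList (PySem.Dict.ofList walcl).keys) (PySem.Dict.ofList tga).keys) (PySem.Dict.ofList rrp).keys) (fun x => x) false).map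
    (fun d => (d, (PySem.Dict.ofList walcl).getD d 0 - (PySem.Dict.ofList tga).getD d 0 - (PySem.Dict.ofList rrp).getD d 0))

-- the last value stored for key d by the pairs xs (dict(xs).get(d), none if absent)
def lastVal : List (String × Int) → String → Option Int
  | [], _ => none
  | p :: rest, d => match lastVal rest d with
    | some v => some v
    | none => if p.1 = d then some p.2 else none

theorem lastVal_isSome_iff (xs : List (String × Int)) (d : String) :
    (lastVal xs d).isSome = true ↔ d ∈ xs.map Prod.fst := by
  induction xs with
  | nil => simp [lastVal]
  | cons p rest ih =>
    simp only [lastVal, List.map_cons, List.mem_cons]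
    cases h : lastVal rest d with
    | some v =>
      rw [h] at ih; simp only [Option.isSome_some] at ih
      simp [← ih]
    | none =>
      rw [h] at ih; simp only [Option.isSome_none, Bool.false_eq_true, false_iff] at ih
      by_cases hp : p.1 = d
      · simp [hp]
      · simp [hp, ih]
        exact fun hh => hp hh.symm

theorem get?_foldl_insert (xs : List (String × Int)) (D : PySem.Dict String Int) (k : String) :
    (xs.foldl (fun d p => d.insert p.1 p.2) D).get? k
      = match lastVal xs k with | some v => some v | none => D.get? k := by
  induction xs generalizing D with
  | nil => simp [lastVal]
  | cons p rest ih =>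
    simp only [List.foldl_cons, lastVal, ih]
    cases h : lastVal rest k with
    | some v => simp
    | none =>
      by_cases hp : p.1 = k
      · subst hp; simp [PySem.Dict.get?_insert_self]
      · simp [PySem.Dict.get?_insert_of_ne _ _ (Ne.symm hp), hp]

theorem get?_ofList (xs : List (String × Int)) (k : String) :
    (PySem.Dict.ofList xs).get? k = lastVal xs k := by
  have h := get?_foldl_insert xs PySem.Dict.empty k
  rw [show (PySem.Dict.ofList xs) = xs.foldl (fun d p => d.insert p.1 p.2) PySem.Dict.empty from rfl, h]
  cases lastVal xs k <;> simp [PySem.Dict.get?_empty]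

theorem mem_keys_ofList (xs : List (String × Int)) (k : String) :
    k ∈ (PySem.Dict.ofList xs).keys ↔ k ∈ xs.map Prod.fst := by
  rw [← lastVal_isSome_iff, ← get?_ofList]
  rw [← not_iff_not]
  simp [← PySem.Dict.get?_eq_none_iff_not_mem_keys, Option.isSome_iff_ne_none]

-- one setdefault phase: inner lookup at tag after folding xs with outer tag K
theorem phase_get (K : String) (xs : List (String × Int))
    (D : PySem.Dict String (PySem.Dict String Int)) (d tag : String) :
    ((xs.foldl (fun D p => D.modify p.1 PySem.Dict.empty (fun inner => inner.insert K p.2)) D).getD d PySem.Dict.empty).get? tag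
      = match (if tag = K then lastVal xs d else none) with
        | some v => some v
        | none => (D.getD d PySem.Dict.empty).get? tag := by
  induction xs generalizing D with
  | nil => simp [lastVal]
  | cons p rest ih =>
    simp only [List.foldl_cons, ih, lastVal]
    cases h : lastVal rest d with
    | some v =>
      by_cases htag : tag = K
      · simp [htag]
      · simp only [htag, PySem.Dict.getD_modify]
        by_cases hd : d = p.1 <;>
          simp [hd, PySem.Dict.get?_insert_of_ne _ _ htag]
    | none =>
      simp only [PySem.Dict.getD_modify]
      by_cases htag : tag = K
      · subst htag
        by_cases hd : d = p.1
        · simp [hd, PySem.Dict.get?_insert_self]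
        · simp only [if_neg hd, if_neg (fun hh : p.1 = d => hd hh.symm)]
      · by_cases hd : d = p.1
        · simp [hd, if_neg htag, PySem.Dict.get?_insert_of_ne _ _ htag]
        · simp [hd, if_neg htag]

-- A's fully built nested dict, named for the proofs
def dvAll (walcl tga rrp : List (String × Int)) : PySem.Dict String (PySem.Dict String Int) :=
  rrp.foldl (fun D p => D.modify p.1 PySem.Dict.empty (fun inner => inner.insert "RRP" p.2))
    (tga.foldl (fun D p => D.modify p.1 PySem.Dict.empty (fun inner => inner.insert "TGA" p.2))
      (walcl.foldl (fun D p => D.modify p.1 PySem.Dict.empty (fun inner => inner.insert "WALCL" p.2)) PySem.Dict.empty))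

theorem dvAll_get_W (walcl tga rrp : List (String × Int)) (d : String) :
    (((dvAll walcl tga rrp).getD d PySem.Dict.empty).get? "WALCL") = lastVal walcl d := by
  unfold dvAll
  rw [phase_get, phase_get, phase_get]
  cases lastVal walcl d <;> simp

theorem dvAll_get_T (walcl tga rrp : List (String × Int)) (d : String) :
    (((dvAll walcl tga rrp).getD d PySem.Dict.empty).get? "TGA") = lastVal tga d := by
  unfold dvAll
  rw [phase_get, phase_get, phase_get]
  cases lastVal tga d <;> simp

theorem dvAll_get_R (walcl tga rrp : List (String × Int)) (d : String) :
    (((dvAll walcl tga rrp).getD d PySem.Dict.empty).get? "RRP") = lastVal rrp d := by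
  unfold dvAll
  rw [phase_get, phase_get, phase_get]
  cases lastVal rrp d <;> simp

theorem dvAll_keys (walcl tga rrp : List (String × Int)) :
    (dvAll walcl tga rrp).keys
      = PySem.Set.update (PySem.Set.update (PySem.Set.update [] (walcl.map Prod.fst)) (tga.map Prod.fst)) (rrp.map Prod.fst) := by
  unfold dvAll
  rw [PySem.Dict.keys_foldl_modify_key, PySem.Dict.keys_foldl_modify_key, PySem.Dict.keys_foldl_modify_key,
      PySem.Dict.keys_empty]

theorem A_unfold (walcl tga rrp : List (String × Int)) :
    compute_net_liquidity walcl tga rrp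
      = (PySem.List.sorted (dvAll walcl tga rrp).keys (fun x => x) false).foldl
          (fun result date =>
            if (["WALCL", "TGA", "RRP"] : List String).all (fun k => ((dvAll walcl tga rrp).getD date PySem.Dict.empty).contains k) then
              result ++ [(date, ((dvAll walcl tga rrp).getD date PySem.Dict.empty).getD "WALCL" 0 - ((dvAll walcl tga rrp).getD date PySem.Dict.empty).getD "TGA" 0 - ((dvAll walcl tga rrp).getD date PySem.Dict.empty).getD "RRP" 0)]
            else result) [] := rfl

theorem A_eq_canon (walcl tga rrp : List (String × Int)) :
    compute_net_liquidity walcl tga rrp = canonNL walcl tga rrp := by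
  rw [A_unfold]; unfold canonNL
  rw [PySem.List.foldl_append_if, List.nil_append]
  have hkeysnd : (dvAll walcl tga rrp).keys.Nodup := by
    rw [dvAll_keys]
    exact PySem.Set.nodup_update _ _ (PySem.Set.nodup_update _ _ (PySem.Set.nodup_update _ _ List.nodup_nil))
  have hcommonnd :
      (PySem.Set.inter (PySem.Set.inter (PySem.Set.ofList (PySem.Dict.ofList walcl).keys) (PySem.Dict.ofList tga).keys) (PySem.Dict.ofList rrp).keys).Nodup :=
    PySem.Set.nodup_inter _ _ (PySem.Set.nodup_inter _ _ (PySem.Set.nodup_ofList _))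
  have hsortnd : (PySem.List.sorted (dvAll walcl tga rrp).keys (fun x => x) false).Nodup :=
    ((PySem.List.sorted_perm _ _ _).nodup_iff).mpr hkeysnd
  have hcond : ∀ x : String,
      ((["WALCL", "TGA", "RRP"] : List String).all (fun k => ((dvAll walcl tga rrp).getD x PySem.Dict.empty).contains k)) = true
        ↔ (x ∈ walcl.map Prod.fst ∧ x ∈ tga.map Prod.fst ∧ x ∈ rrp.map Prod.fst) := by
    intro x
    simp only [List.all_cons, List.all_nil, Bool.and_eq_true, Bool.and_true,
      PySem.Dict.contains_eq_isSome_get?, dvAll_get_W, dvAll_get_T, dvAll_get_R,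
      lastVal_isSome_iff]
  have hfilter :
      (PySem.List.sorted (dvAll walcl tga rrp).keys (fun x => x) false).filter
          (fun date => (["WALCL", "TGA", "RRP"] : List String).all (fun k => ((dvAll walcl tga rrp).getD date PySem.Dict.empty).contains k))
        = PySem.List.sorted (PySem.Set.inter (PySem.Set.inter (PySem.Set.ofList (PySem.Dict.ofList walcl).keys) (PySem.Dict.ofList tga).keys) (PySem.Dict.ofList rrp).keys) (fun x => x) false := by
    refine (PySem.List.sorted_eq_of_perm_of_pairwise_lt _ _ _ ?_ ?_).symm
    · refine (List.perm_ext_iff_of_nodup (hsortnd.filter _) hcommonnd).mpr ?_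
      intro x
      simp only [List.mem_filter, PySem.List.mem_sorted, PySem.Set.mem_inter,
        PySem.Set.mem_ofList, mem_keys_ofList, hcond, dvAll_keys, PySem.Set.mem_update,
        List.not_mem_nil, false_or]
      tauto
    · refine List.Pairwise.filter _ ?_
      exact ((PySem.List.sorted_pairwise _ _).and hsortnd).imp (fun h => lt_of_le_of_ne h.1 h.2)
  rw [hfilter]
  refine List.map_congr_left ?_
  intro d _
  rw [PySem.Dict.getD_eq_get?_getD ((dvAll walcl tga rrp).getD d PySem.Dict.empty) "WALCL" 0,
      PySem.Dict.getD_eq_get?_getD ((dvAll walcl tga rrp).getD d PySem.Dict.empty) "TGA" 0,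
      PySem.Dict.getD_eq_get?_getD ((dvAll walcl tga rrp).getD d PySem.Dict.empty) "RRP" 0,
      dvAll_get_W, dvAll_get_T, dvAll_get_R,
      PySem.Dict.getD_eq_get?_getD (PySem.Dict.ofList walcl) d 0,
      PySem.Dict.getD_eq_get?_getD (PySem.Dict.ofList tga) d 0,
      PySem.Dict.getD_eq_get?_getD (PySem.Dict.ofList rrp) d 0,
      get?_ofList, get?_ofList, get?_ofList]

-- ===== B side =====

-- every output element of the merge carries a key present in the first input list
theorem merge3_mem_fst (a b c : List (String × Int)) (p : String × Int)
    (hp : p ∈ merge3NL a b c) : ∃ va, (p.1, va) ∈ a := by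
  fun_induction merge3NL a b c with
  | case1 da va a' db vb b' dc vc c' h ih =>
    obtain ⟨w, hw⟩ := ih hp; exact ⟨w, List.mem_cons_of_mem _ hw⟩
  | case2 da va a' db vb b' dc vc c' h1 h2 ih => exact ih hp
  | case3 da va a' db vb b' dc vc c' h1 h2 h3 ih => exact ih hp
  | case4 da va a' db vb b' dc vc c' h1 h2 h3 ih =>
    rcases List.mem_cons.mp hp with h | h
    · exact ⟨va, by rw [h]; exact List.mem_cons_self⟩
    · obtain ⟨w, hw⟩ := ih h; exact ⟨w, List.mem_cons_of_mem _ hw⟩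
  | case5 => exact absurd hp List.not_mem_nil

theorem merge3_pairwise (a b c : List (String × Int))
    (ha : a.Pairwise (fun p q => p.1 < q.1)) :
    (merge3NL a b c).Pairwise (fun p q => p.1 < q.1) := by
  fun_induction merge3NL a b c with
  | case1 da va a' db vb b' dc vc c' h ih => exact ih (List.pairwise_cons.mp ha).2
  | case2 da va a' db vb b' dc vc c' h1 h2 ih => exact ih ha
  | case3 da va a' db vb b' dc vc c' h1 h2 h3 ih => exact ih ha
  | case4 da va a' db vb b' dc vc c' h1 h2 h3 ih =>
    obtain ⟨hhead, htail⟩ := List.pairwise_cons.mp ha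
    refine List.pairwise_cons.mpr ⟨?_, ih htail⟩
    intro q hq
    obtain ⟨w, hw⟩ := merge3_mem_fst a' b' c' q hq
    exact hhead (q.1, w) hw
  | case5 => exact List.Pairwise.nil

theorem merge3_mem_of (a b c : List (String × Int)) (d : String) (va vb vc : Int)
    (hva : (d, va) ∈ a) (hvb : (d, vb) ∈ b) (hvc : (d, vc) ∈ c)
    (ha : a.Pairwise (fun p q => p.1 < q.1)) (hb : b.Pairwise (fun p q => p.1 < q.1))
    (hc : c.Pairwise (fun p q => p.1 < q.1)) :
    (d, va - vb - vc) ∈ merge3NL a b c := by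
  fun_induction merge3NL a b c with
  | case1 da va0 a' db vb0 b' dc vc0 c' h ih =>
    have hdb : db ≤ d := by
      rcases List.mem_cons.mp hvb with hh | hh
      · exact le_of_eq (congrArg Prod.fst hh).symm
      · exact le_of_lt ((List.pairwise_cons.mp hb).1 _ hh)
    have hdc : dc ≤ d := by
      rcases List.mem_cons.mp hvc with hh | hh
      · exact le_of_eq (congrArg Prod.fst hh).symm
      · exact le_of_lt ((List.pairwise_cons.mp hc).1 _ hh)
    have hne : d ≠ da := by
      rintro rfl
      rcases h with h | h
      · exact absurd hdb (not_le.mpr h)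
      · exact absurd hdc (not_le.mpr h)
    have hmem : (d, va) ∈ a' := by
      rcases List.mem_cons.mp hva with hh | hh
      · exact absurd (congrArg Prod.fst hh) hne
      · exact hh
    exact ih hmem hvb hvc (List.pairwise_cons.mp ha).2 hb hc
  | case2 da va0 a' db vb0 b' dc vc0 c' h1 h2 ih =>
    have hda : da ≤ d := by
      rcases List.mem_cons.mp hva with hh | hh
      · exact le_of_eq (congrArg Prod.fst hh).symm
      · exact le_of_lt ((List.pairwise_cons.mp ha).1 _ hh)
    have hdc : dc ≤ d := by
      rcases List.mem_cons.mp hvc with hh | hh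
      · exact le_of_eq (congrArg Prod.fst hh).symm
      · exact le_of_lt ((List.pairwise_cons.mp hc).1 _ hh)
    have hne : d ≠ db := by
      rintro rfl
      rcases h2 with h | h
      · exact absurd hda (not_le.mpr h)
      · exact absurd hdc (not_le.mpr h)
    have hmem : (d, vb) ∈ b' := by
      rcases List.mem_cons.mp hvb with hh | hh
      · exact absurd (congrArg Prod.fst hh) hne
      · exact hh
    exact ih hva hmem hvc ha (List.pairwise_cons.mp hb).2 hc
  | case3 da va0 a' db vb0 b' dc vc0 c' h1 h2 h3 ih =>
    have hda : da ≤ d := by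
      rcases List.mem_cons.mp hva with hh | hh
      · exact le_of_eq (congrArg Prod.fst hh).symm
      · exact le_of_lt ((List.pairwise_cons.mp ha).1 _ hh)
    have hdb : db ≤ d := by
      rcases List.mem_cons.mp hvb with hh | hh
      · exact le_of_eq (congrArg Prod.fst hh).symm
      · exact le_of_lt ((List.pairwise_cons.mp hb).1 _ hh)
    have hne : d ≠ dc := by
      rintro rfl
      rcases h3 with h | h
      · exact absurd hda (not_le.mpr h)
      · exact absurd hdb (not_le.mpr h)
    have hmem : (d, vc) ∈ c' := by
      rcases List.mem_cons.mp hvc with hh | hh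
      · exact absurd (congrArg Prod.fst hh) hne
      · exact hh
    exact ih hva hvb hmem ha hb (List.pairwise_cons.mp hc).2
  | case4 da va0 a' db vb0 b' dc vc0 c' h1 h2 h3 ih =>
    have hd2 : db = da := le_antisymm (not_lt.mp (not_or.mp h1).1) (not_lt.mp (not_or.mp h2).1)
    have hd3 : dc = da := le_antisymm (not_lt.mp (not_or.mp h1).2) (not_lt.mp (not_or.mp h3).1)
    by_cases hd : d = da
    · subst hd
      have hva' : va = va0 := by
        rcases List.mem_cons.mp hva with hh | hh
        · exact (Prod.ext_iff.mp hh).2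
        · exact absurd ((List.pairwise_cons.mp ha).1 _ hh) (lt_irrefl _)
      have hvb' : vb = vb0 := by
        rcases List.mem_cons.mp hvb with hh | hh
        · exact (Prod.ext_iff.mp hh).2
        · have hlt := (List.pairwise_cons.mp hb).1 _ hh
          rw [hd2] at hlt; exact absurd hlt (lt_irrefl _)
      have hvc' : vc = vc0 := by
        rcases List.mem_cons.mp hvc with hh | hh
        · exact (Prod.ext_iff.mp hh).2
        · have hlt := (List.pairwise_cons.mp hc).1 _ hh
          rw [hd3] at hlt; exact absurd hlt (lt_irrefl _)
      rw [hva', hvb', hvc']; exact List.mem_cons_self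
    · have hma : (d, va) ∈ a' := by
        rcases List.mem_cons.mp hva with hh | hh
        · exact absurd (congrArg Prod.fst hh) hd
        · exact hh
      have hmb : (d, vb) ∈ b' := by
        rcases List.mem_cons.mp hvb with hh | hh
        · exact absurd ((congrArg Prod.fst hh).trans hd2) hd
        · exact hh
      have hmc : (d, vc) ∈ c' := by
        rcases List.mem_cons.mp hvc with hh | hh
        · exact absurd ((congrArg Prod.fst hh).trans hd3) hd
        · exact hh
      exact List.mem_cons_of_mem _
        (ih hma hmb hmc (List.pairwise_cons.mp ha).2 (List.pairwise_cons.mp hb).2 (List.pairwise_cons.mp hc).2)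
  | case5 x y z h =>
    rcases x with _ | ⟨⟨da, va0⟩, a'⟩
    · exact absurd hva List.not_mem_nil
    rcases y with _ | ⟨⟨db, vb0⟩, b'⟩
    · exact absurd hvb List.not_mem_nil
    rcases z with _ | ⟨⟨dc, vc0⟩, c'⟩
    · exact absurd hvc List.not_mem_nil
    exact (h da va0 a' db vb0 b' dc vc0 c' rfl rfl rfl).elim

theorem merge3_mem_iff (a b c : List (String × Int)) (d : String) (v : Int)
    (ha : a.Pairwise (fun p q => p.1 < q.1)) (hb : b.Pairwise (fun p q => p.1 < q.1))
    (hc : c.Pairwise (fun p q => p.1 < q.1)) :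
    (d, v) ∈ merge3NL a b c
      ↔ ∃ va vb vc, (d, va) ∈ a ∧ (d, vb) ∈ b ∧ (d, vc) ∈ c ∧ v = va - vb - vc := by
  constructor
  · intro hp
    clear ha hb hc
    fun_induction merge3NL a b c with
    | case1 da va0 a' db vb0 b' dc vc0 c' h ih =>
      obtain ⟨va, vb, vc, h1, h2, h3, h4⟩ := ih hp
      exact ⟨va, vb, vc, List.mem_cons_of_mem _ h1, h2, h3, h4⟩
    | case2 da va0 a' db vb0 b' dc vc0 c' h1 h2 ih =>
      obtain ⟨va, vb, vc, g1, g2, g3, g4⟩ := ih hp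
      exact ⟨va, vb, vc, g1, List.mem_cons_of_mem _ g2, g3, g4⟩
    | case3 da va0 a' db vb0 b' dc vc0 c' h1 h2 h3 ih =>
      obtain ⟨va, vb, vc, g1, g2, g3, g4⟩ := ih hp
      exact ⟨va, vb, vc, g1, g2, List.mem_cons_of_mem _ g3, g4⟩
    | case4 da va0 a' db vb0 b' dc vc0 c' h1 h2 h3 ih =>
      have hd2 : db = da := le_antisymm (not_lt.mp (not_or.mp h1).1) (not_lt.mp (not_or.mp h2).1)
      have hd3 : dc = da := le_antisymm (not_lt.mp (not_or.mp h1).2) (not_lt.mp (not_or.mp h3).1)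
      rcases List.mem_cons.mp hp with h | h
      · have hd : d = da := congrArg Prod.fst h
        have hv : v = va0 - vb0 - vc0 := congrArg Prod.snd h
        exact ⟨va0, vb0, vc0, by rw [hd]; exact List.mem_cons_self,
          by rw [hd, ← hd2]; exact List.mem_cons_self,
          by rw [hd, ← hd3]; exact List.mem_cons_self, hv⟩
      · obtain ⟨va, vb, vc, g1, g2, g3, g4⟩ := ih h
        exact ⟨va, vb, vc, List.mem_cons_of_mem _ g1, List.mem_cons_of_mem _ g2,
          List.mem_cons_of_mem _ g3, g4⟩
    | case5 => exact absurd hp List.not_mem_nil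
  · rintro ⟨va, vb, vc, h1, h2, h3, rfl⟩
    exact merge3_mem_of a b c d va vb vc h1 h2 h3 ha hb hc

-- dedupSortNL xs is strictly increasing on the dates
theorem dedupSort_pairwise (xs : List (String × Int)) :
    (dedupSortNL xs).Pairwise (fun p q => p.1 < q.1) := by
  have hnd : ((dedupSortNL xs).map Prod.fst).Nodup := by
    have hperm : (dedupSortNL xs).Perm (PySem.Dict.ofList xs).items :=
      PySem.List.sorted_perm _ _ _
    exact ((hperm.map Prod.fst).nodup_iff).mpr (PySem.Dict.nodup_keys_ofList xs)
  have hpw : (dedupSortNL xs).Pairwise (fun p q => p.1 ≤ q.1) :=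
    PySem.List.sorted_pairwise _ _
  have hneq : (dedupSortNL xs).Pairwise (fun p q => p.1 ≠ q.1) :=
    (List.pairwise_map).mp hnd
  exact (hpw.and hneq).imp (fun h => lt_of_le_of_ne h.1 h.2)

-- membership in dedupSortNL xs is exactly dict(xs) lookup
theorem dedupSort_mem (xs : List (String × Int)) (d : String) (v : Int) :
    (d, v) ∈ dedupSortNL xs ↔ (PySem.Dict.ofList xs).get? d = some v := by
  have hperm : (dedupSortNL xs).Perm (PySem.Dict.ofList xs).items :=
    PySem.List.sorted_perm _ _ _
  rw [hperm.mem_iff]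
  exact (PySem.Dict.get?_eq_some_iff_mem_items _ _ _ (PySem.Dict.nodup_keys_ofList xs)).symm

-- two strictly key-increasing pair lists with the same members are equal
theorem eq_of_mem_iff_pairwise_lt :
    ∀ (l1 l2 : List (String × Int)), l1.Pairwise (fun p q => p.1 < q.1) →
      l2.Pairwise (fun p q => p.1 < q.1) → (∀ p, p ∈ l1 ↔ p ∈ l2) → l1 = l2
  | [], [], _, _, _ => rfl
  | [], q :: t2, _, _, h => absurd ((h q).mpr List.mem_cons_self) List.not_mem_nil
  | p :: t1, [], _, _, h => absurd ((h p).mp List.mem_cons_self) List.not_mem_nil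
  | p :: t1, q :: t2, h1, h2, h => by
    have hpq : p = q := by
      by_contra hne
      have hp2 : p ∈ t2 := by
        rcases List.mem_cons.mp ((h p).mp List.mem_cons_self) with hh | hh
        · exact absurd hh hne
        · exact hh
      have hq1 : q ∈ t1 := by
        rcases List.mem_cons.mp ((h q).mpr List.mem_cons_self) with hh | hh
        · exact absurd hh.symm hne
        · exact hh
      exact lt_asymm ((List.pairwise_cons.mp h1).1 q hq1) ((List.pairwise_cons.mp h2).1 p hp2)
    subst hpq
    have htail : ∀ r, r ∈ t1 ↔ r ∈ t2 := by
      intro r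
      constructor
      · intro hr
        rcases List.mem_cons.mp ((h r).mp (List.mem_cons_of_mem _ hr)) with hh | hh
        · exact absurd ((List.pairwise_cons.mp h1).1 r hr) (by rw [hh]; exact lt_irrefl _)
        · exact hh
      · intro hr
        rcases List.mem_cons.mp ((h r).mpr (List.mem_cons_of_mem _ hr)) with hh | hh
        · exact absurd ((List.pairwise_cons.mp h2).1 r hr) (by rw [hh]; exact lt_irrefl _)
        · exact hh
    rw [eq_of_mem_iff_pairwise_lt t1 t2 (List.pairwise_cons.mp h1).2 (List.pairwise_cons.mp h2).2 htail]

theorem B_eq_canon (walcl tga rrp : List (String × Int)) :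
    compute_net_liquidity_alt walcl tga rrp = canonNL walcl tga rrp := by
  have hcommonnd :
      (PySem.Set.inter (PySem.Set.inter (PySem.Set.ofList (PySem.Dict.ofList walcl).keys) (PySem.Dict.ofList tga).keys) (PySem.Dict.ofList rrp).keys).Nodup :=
    PySem.Set.nodup_inter _ _ (PySem.Set.nodup_inter _ _ (PySem.Set.nodup_ofList _))
  have hsortnd :
      (PySem.List.sorted (PySem.Set.inter (PySem.Set.inter (PySem.Set.ofList (PySem.Dict.ofList walcl).keys) (PySem.Dict.ofList tga).keys) (PySem.Dict.ofList rrp).keys) (fun x => x) false).Pairwise (· < ·) := by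
    have hnd := ((PySem.List.sorted_perm (PySem.Set.inter (PySem.Set.inter (PySem.Set.ofList (PySem.Dict.ofList walcl).keys) (PySem.Dict.ofList tga).keys) (PySem.Dict.ofList rrp).keys) (fun x : String => x) false).nodup_iff).mpr hcommonnd
    exact ((PySem.List.sorted_pairwise _ _).and hnd).imp (fun h => lt_of_le_of_ne h.1 h.2)
  have hCpw : (canonNL walcl tga rrp).Pairwise (fun p q => p.1 < q.1) := by
    unfold canonNL
    exact (List.pairwise_map).mpr hsortnd
  have hBpw : (compute_net_liquidity_alt walcl tga rrp).Pairwise (fun p q => p.1 < q.1) :=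
    merge3_pairwise _ _ _ (dedupSort_pairwise walcl)
  refine eq_of_mem_iff_pairwise_lt _ _ hBpw hCpw ?_
  rintro ⟨d, v⟩
  rw [show compute_net_liquidity_alt walcl tga rrp
        = merge3NL (dedupSortNL walcl) (dedupSortNL tga) (dedupSortNL rrp) from rfl,
      merge3_mem_iff _ _ _ d v (dedupSort_pairwise walcl) (dedupSort_pairwise tga) (dedupSort_pairwise rrp)]
  unfold canonNL
  simp only [dedupSort_mem, List.mem_map, PySem.List.mem_sorted, PySem.Set.mem_inter,
    PySem.Set.mem_ofList, Prod.mk.injEq]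
  constructor
  · rintro ⟨va, vb, vc, h1, h2, h3, rfl⟩
    have k1 : d ∈ (PySem.Dict.ofList walcl).keys := by
      by_contra hN
      rw [← PySem.Dict.get?_eq_none_iff_not_mem_keys] at hN
      simp [h1] at hN
    have k2 : d ∈ (PySem.Dict.ofList tga).keys := by
      by_contra hN
      rw [← PySem.Dict.get?_eq_none_iff_not_mem_keys] at hN
      simp [h2] at hN
    have k3 : d ∈ (PySem.Dict.ofList rrp).keys := by
      by_contra hN
      rw [← PySem.Dict.get?_eq_none_iff_not_mem_keys] at hN
      simp [h3] at hN
    refine ⟨d, ⟨⟨k1, k2⟩, k3⟩, rfl, ?_⟩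
    rw [PySem.Dict.getD_eq_get?_getD, PySem.Dict.getD_eq_get?_getD, PySem.Dict.getD_eq_get?_getD,
        h1, h2, h3]
    rfl
  · rintro ⟨x, ⟨⟨hx1, hx2⟩, hx3⟩, rfl, rfl⟩
    have o1 : (PySem.Dict.ofList walcl).get? x ≠ none := by
      intro hN
      rw [PySem.Dict.get?_eq_none_iff_not_mem_keys] at hN
      exact hN hx1
    have o2 : (PySem.Dict.ofList tga).get? x ≠ none := by
      intro hN
      rw [PySem.Dict.get?_eq_none_iff_not_mem_keys] at hN
      exact hN hx2
    have o3 : (PySem.Dict.ofList rrp).get? x ≠ none := by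
      intro hN
      rw [PySem.Dict.get?_eq_none_iff_not_mem_keys] at hN
      exact hN hx3
    obtain ⟨va, hva⟩ := Option.ne_none_iff_exists'.mp o1
    obtain ⟨vb, hvb⟩ := Option.ne_none_iff_exists'.mp o2
    obtain ⟨vc, hvc⟩ := Option.ne_none_iff_exists'.mp o3
    refine ⟨va, vb, vc, hva, hvb, hvc, ?_⟩
    rw [PySem.Dict.getD_eq_get?_getD, PySem.Dict.getD_eq_get?_getD, PySem.Dict.getD_eq_get?_getD,
        hva, hvb, hvc]
    rfl

-- ===== VERDICT (by name: the statement is the Claim_ definition above) =====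
theorem compute_net_liquidity_spec : Claim_equal_compute_net_liquidity := by
  intro walcl tga rrp _
  unfold Spec_compute_net_liquidity
  rw [A_eq_canon, B_eq_canon]
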